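-- pv_equiv track=rewrite | github.com/fanzhangg/gomoku-ai | score_counter.py | split_row_by_oppo
-- ===== SOURCE A (Python) =====
-- def split_row_by_oppo(row: list, id: int, oppo: int):
--     """
--     Split row by oppo or 00+
--     :param row:
--     :param id:
--     :param oppo:
--     :return:
--     """
--     frags = []
--     frag = []
--     for i in range(len(row)):
--         num = row[i]
--         if num == oppo:  # encounter a oppo stone
--             if not frag == [] and 0 in frag:  # the chain has a gap, so it is alive
--                 frags.append(frag)
--                 frag = []
--         else:   # is 0 or self id
--             frag.append(num)
--
--         if i == len(row) - 1:  # reach the end of the row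
--             if not frag == [] and 0 in frag:
--                 frags.append(frag)
--     return frags
-- ===== SOURCE B (Python) =====
-- def split_row_by_oppo(row: list, id: int, oppo: int):
--     """Cut-position decomposition: iterate over the opponent-stone positions,
--     extend the pending fragment with whole slices between cuts, and keep a
--     liveness flag so the fragment is never rescanned for a gap."""
--     frags = []
--     carry = []
--     live = False
--     start = 0
--     for cut in [i for i, x in enumerate(row) if x == oppo]:
--         seg = row[start:cut]
--         carry += seg
--         live = live or 0 in seg
--         if carry and live:
--             frags.append(carry)
--             carry = []
--             live = False
--         start = cut + 1
--     seg = row[start:]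
--     carry += seg
--     if carry and (live or 0 in seg):
--         frags.append(carry)
--     return frags
-- ===== Notes on version B (the rewrite author's own statement) =====
-- stated objective: alternative
-- what changed: B iterates over the opponent-stone positions (computed once with enumerate) instead of over every cell, extending the pending fragment with whole slices between cuts and tracking liveness with a has-zero flag instead of rescanning the fragment with '0 in frag' at every opponent stone and at the end of the row.
import Mathlib
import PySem

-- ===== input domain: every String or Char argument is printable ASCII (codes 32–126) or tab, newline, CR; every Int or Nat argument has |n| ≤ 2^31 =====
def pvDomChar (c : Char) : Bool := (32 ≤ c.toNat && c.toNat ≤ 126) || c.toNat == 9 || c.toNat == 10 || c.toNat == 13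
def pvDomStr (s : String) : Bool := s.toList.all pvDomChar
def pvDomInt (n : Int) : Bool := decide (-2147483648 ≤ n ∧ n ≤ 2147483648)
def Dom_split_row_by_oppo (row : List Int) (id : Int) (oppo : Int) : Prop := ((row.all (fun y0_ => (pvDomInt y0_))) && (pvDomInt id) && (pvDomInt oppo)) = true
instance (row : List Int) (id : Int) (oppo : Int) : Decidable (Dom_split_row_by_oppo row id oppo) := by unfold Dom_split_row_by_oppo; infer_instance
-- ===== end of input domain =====

-- B re-implements the splitter by iterating over the opponent-stone positions and slicing,
-- with a liveness flag instead of rescanning the fragment for a gap (objective: alternative).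

-- ===== PORT A =====
-- loop body of A's `for i in range(len(row))` (state = (frags, frag), p = (i, row[i]))
def pvStepA (n oppo : Int) (st : List (List Int) × List Int) (p : Int × Int) :
    List (List Int) × List Int :=
  let st1 :=
    if p.2 = oppo then
      (if ¬ st.2 = [] ∧ (0:Int) ∈ st.2 then (st.1 ++ [st.2], ([] : List Int)) else st)
    else (st.1, st.2 ++ [p.2])
  if p.1 = n - 1 then
    (if ¬ st1.2 = [] ∧ (0:Int) ∈ st1.2 then (st1.1 ++ [st1.2], st1.2) else st1)
  else st1

def split_row_by_oppo (row : List Int) (id : Int) (oppo : Int) : List (List Int) :=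
  let n : Int := PySem.List.len row
  ((PySem.List.enumerate row 0).foldl (pvStepA n oppo) ([], [])).1

-- ===== PORT B =====
-- loop body of B's `for cut in [i for i, x in enumerate(row) if x == oppo]`
-- (state = (frags, carry, live, start))
def pvStepB (row : List Int) (st : List (List Int) × List Int × Bool × Int) (cut : Int) :
    List (List Int) × List Int × Bool × Int :=
  let seg := PySem.List.slice row (some st.2.2.2) (some cut)
  let carry := st.2.1 ++ seg
  let live := st.2.2.1 || decide ((0:Int) ∈ seg)
  if carry ≠ [] ∧ live = true then (st.1 ++ [carry], [], false, cut + 1)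
  else (st.1, carry, live, cut + 1)

-- B's code after the loop: `seg = row[start:]; carry += seg; if carry and (live or 0 in seg): …`
def pvFinishB (row : List Int) (st : List (List Int) × List Int × Bool × Int) :
    List (List Int) :=
  let seg := PySem.List.slice row (some st.2.2.2) none
  let carry := st.2.1 ++ seg
  if carry ≠ [] ∧ (st.2.2.1 || decide ((0:Int) ∈ seg)) = true then st.1 ++ [carry] else st.1

def split_row_by_oppo_alt (row : List Int) (id : Int) (oppo : Int) : List (List Int) :=
  let cuts : List Int :=
    ((PySem.List.enumerate row 0).filter (fun p => p.2 == oppo)).map (fun p => p.1)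
  pvFinishB row (cuts.foldl (pvStepB row) ([], [], false, 0))

-- ===== PRECONDITION & SPEC =====
def Spec_split_row_by_oppo (row : List Int) (id : Int) (oppo : Int) (out : List (List Int)) : Prop := out = split_row_by_oppo_alt row id oppo
instance (row : List Int) (id : Int) (oppo : Int) (out : List (List Int)) : Decidable (Spec_split_row_by_oppo row id oppo out) := by unfold Spec_split_row_by_oppo; infer_instance

-- ===== CLAIM (what is proved, stated in full; the proofs are below) =====
def Claim_equal_split_row_by_oppo : Prop := ∀ (row : List Int) (id : Int) (oppo : Int), Dom_split_row_by_oppo row id oppo → Spec_split_row_by_oppo row id oppo (split_row_by_oppo row id oppo)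

-- ===== LEMMAS AND PROOFS =====

-- canonical recursion both ports are reduced to: scan the row, extending the pending
-- fragment on non-opponent stones and flushing it at an opponent stone iff it is live
def pvGo (oppo : Int) : List Int → List Int → List (List Int)
  | [], carry => if carry ≠ [] ∧ (0:Int) ∈ carry then [carry] else []
  | x :: rest, carry =>
    if x = oppo then
      if carry ≠ [] ∧ (0:Int) ∈ carry then carry :: pvGo oppo rest []
      else pvGo oppo rest carry
    else pvGo oppo rest (carry ++ [x])

-- A's loop body without the index bookkeeping
def pvSimpleStep (oppo : Int) (st : List (List Int) × List Int) (x : Int) :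
    List (List Int) × List Int :=
  if x = oppo then
    (if ¬ st.2 = [] ∧ (0:Int) ∈ st.2 then (st.1 ++ [st.2], ([] : List Int)) else st)
  else (st.1, st.2 ++ [x])

-- A's end-of-row flush
def pvFlush (st : List (List Int) × List Int) : List (List Int) :=
  if st.2 ≠ [] ∧ (0:Int) ∈ st.2 then st.1 ++ [st.2] else st.1

lemma pvStepA_eq (n oppo : Int) (st : List (List Int) × List Int) (k x : Int) :
    pvStepA n oppo st (k, x) =
      if k = n - 1 then (pvFlush (pvSimpleStep oppo st x), (pvSimpleStep oppo st x).2)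
      else pvSimpleStep oppo st x := by
  simp only [pvStepA, pvSimpleStep, pvFlush, ne_eq]
  split_ifs <;> simp_all

lemma pvA_fold (n oppo : Int) : ∀ (l : List Int) (k : Int) (st : List (List Int) × List Int),
    k + l.length = n → l ≠ [] →
    ((PySem.List.enumerate l k).foldl (pvStepA n oppo) st).1 =
      pvFlush (l.foldl (pvSimpleStep oppo) st) := by
  intro l
  induction l with
  | nil => intro _ _ _ h; exact absurd rfl h
  | cons x xs ih =>
    intro k st hn _
    rw [PySem.List.enumerate_cons]
    rcases Classical.em (xs = []) with h | h
    · subst h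
      simp only [PySem.List.enumerate_nil, List.foldl_cons, List.foldl_nil, pvStepA_eq]
      have hk : k = n - 1 := by simp at hn; omega
      simp [hk]
    · have hlen : 0 < xs.length := List.length_pos_iff.mpr h
      have hk : ¬ k = n - 1 := by simp at hn; omega
      simp only [List.foldl_cons, pvStepA_eq, if_neg hk]
      exact ih (k + 1) _ (by simp at hn ⊢; omega) h

lemma pvA_go (oppo : Int) : ∀ (l : List Int) (st : List (List Int) × List Int),
    pvFlush (l.foldl (pvSimpleStep oppo) st) = st.1 ++ pvGo oppo l st.2 := by
  intro l
  induction l with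
  | nil =>
    intro st
    simp only [List.foldl_nil, pvFlush, pvGo]
    split_ifs <;> simp
  | cons x xs ih =>
    intro st
    simp only [List.foldl_cons, pvGo]
    by_cases hx : x = oppo
    · by_cases hc : ¬ st.2 = [] ∧ (0:Int) ∈ st.2
      · rw [if_pos hx, if_pos hc]
        have hst : pvSimpleStep oppo st x = (st.1 ++ [st.2], []) := by
          simp only [pvSimpleStep, if_pos hx, if_pos hc]
        rw [hst, ih]
        simp
      · rw [if_pos hx, if_neg hc]
        have hst : pvSimpleStep oppo st x = st := by
          simp only [pvSimpleStep, if_pos hx, if_neg hc]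
        rw [hst, ih]
    · rw [if_neg hx]
      have hst : pvSimpleStep oppo st x = (st.1, st.2 ++ [x]) := by
        simp only [pvSimpleStep, if_neg hx]
      rw [hst, ih]

lemma pvA_eq (row : List Int) (id oppo : Int) :
    split_row_by_oppo row id oppo = pvGo oppo row [] := by
  rcases Classical.em (row = []) with h | h
  · subst h; simp [split_row_by_oppo, pvGo, PySem.List.enumerate_nil]
  · unfold split_row_by_oppo
    rw [pvA_fold (PySem.List.len row) oppo row 0 ([], [])
        (by simp [PySem.List.len_eq]) h]
    rw [pvA_go]
    simp

-- the liveness flag tracks exactly "the pending fragment contains a 0"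
lemma pvLive (live : Bool) (carry seg : List Int) (h : live = true ↔ (0:Int) ∈ carry) :
    ((live || decide ((0:Int) ∈ seg)) = true) ↔ (0:Int) ∈ carry ++ seg := by
  cases live <;> simp_all

-- B side: the slices between successive cut positions of `pre ++ l` reassemble `pre.drop start`
lemma pvB_main (oppo : Int) : ∀ (l pre : List Int) (frags : List (List Int))
    (carry : List Int) (live : Bool) (start : Nat),
    start ≤ pre.length → (live = true ↔ (0:Int) ∈ carry) →
    pvFinishB (pre ++ l)
      ((((PySem.List.enumerate l (pre.length : Int)).filter (fun p => p.2 == oppo)).map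
          (fun p => p.1)).foldl (pvStepB (pre ++ l)) (frags, carry, live, (start : Int)))
      = frags ++ pvGo oppo l (carry ++ pre.drop start) := by
  intro l
  induction l with
  | nil =>
    intro pre frags carry live start hs hlive
    simp only [PySem.List.enumerate_nil, List.filter_nil, List.map_nil, List.foldl_nil,
      pvFinishB, List.append_nil, pvGo]
    rw [PySem.List.slice_from_natCast]
    by_cases hc : carry ++ pre.drop start ≠ [] ∧ (0:Int) ∈ carry ++ pre.drop start
    · rw [if_pos ⟨hc.1, (pvLive live carry (pre.drop start) hlive).mpr hc.2⟩, if_pos hc]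
    · rw [if_neg (fun h => hc ⟨h.1, (pvLive live carry (pre.drop start) hlive).mp h.2⟩),
        if_neg hc]
      simp
  | cons x xs ih =>
    intro pre frags carry live start hs hlive
    rw [PySem.List.enumerate_cons]
    have hrow : pre ++ x :: xs = (pre ++ [x]) ++ xs := by simp
    have hnext : (pre.length : Int) + 1 = ((pre ++ [x]).length : Int) := by
      simp
    by_cases hx : x = oppo
    · -- x is a cut: the pending slice pre.drop start is consumed here
      rw [List.filter_cons_of_pos (by simp [hx]), List.map_cons, List.foldl_cons]
      have hseg : PySem.List.slice (pre ++ x :: xs) (some (start : Int))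
          (some (pre.length : Int)) = pre.drop start := by
        rw [PySem.List.slice_natCast, List.drop_append_of_le_length hs]
        exact List.take_left' (by simp [List.length_drop])
      have hstep : pvStepB (pre ++ x :: xs) (frags, carry, live, (start : Int))
          (pre.length : Int) =
          if carry ++ pre.drop start ≠ [] ∧
              (live || decide ((0:Int) ∈ pre.drop start)) = true then
            (frags ++ [carry ++ pre.drop start], [], false, (pre.length : Int) + 1)
          else (frags, carry ++ pre.drop start,
            live || decide ((0:Int) ∈ pre.drop start), (pre.length : Int) + 1) := by
        simp only [pvStepB, hseg]
      rw [hstep]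
      by_cases hc : carry ++ pre.drop start ≠ [] ∧ (0:Int) ∈ carry ++ pre.drop start
      · rw [if_pos ⟨hc.1, (pvLive live carry (pre.drop start) hlive).mpr hc.2⟩]
        rw [hrow, hnext]
        rw [ih (pre ++ [x]) (frags ++ [carry ++ pre.drop start]) [] false
          (pre ++ [x]).length (le_refl _) (by simp)]
        simp only [List.drop_length, List.append_nil, pvGo, if_pos hx, if_pos hc,
          List.append_assoc, List.singleton_append]
      · rw [if_neg (fun h => hc ⟨h.1, (pvLive live carry (pre.drop start) hlive).mp h.2⟩)]
        rw [hrow, hnext]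
        rw [ih (pre ++ [x]) frags (carry ++ pre.drop start)
          (live || decide ((0:Int) ∈ pre.drop start)) (pre ++ [x]).length (le_refl _)
          (pvLive live carry (pre.drop start) hlive)]
        simp only [List.drop_length, List.append_nil, pvGo, if_pos hx, if_neg hc]
    · -- x is not a cut: it stays inside the pending slice
      rw [List.filter_cons_of_neg (by simp [hx])]
      rw [hrow, hnext]
      rw [ih (pre ++ [x]) frags carry live start (by simp; omega) hlive]
      rw [List.drop_append_of_le_length hs]
      simp only [pvGo, if_neg hx, List.append_assoc]

lemma pvB_eq (row : List Int) (id oppo : Int) :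
    split_row_by_oppo_alt row id oppo = pvGo oppo row [] := by
  unfold split_row_by_oppo_alt
  have h := pvB_main oppo row [] [] [] false 0 (by simp) (by simp)
  simpa using h

-- ===== VERDICT (by name: the statement is the Claim_ definition above) =====
theorem split_row_by_oppo_spec : Claim_equal_split_row_by_oppo := by
  intro row id oppo _
  unfold Spec_split_row_by_oppo
  rw [pvA_eq, pvB_eq]
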